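-- pv_equiv track=rewrite | github.com/7eja5/HackerRank | Algorithms/WarmUp/MiniMaxSum.py | minMaxSum
-- ===== SOURCE A (Python) =====
-- def minMaxSum(arr):
--     #Considering that array is small
--     arr.sort()
--     max = 0
--     min =0
--     for a in range(len(arr)-1):
--         max+=arr[a]
--     for ar in range(len(arr)-1,0,-1):
--         min+=arr[ar]
--     return str(max )+' '+ str(min)
-- ===== SOURCE B (Python) =====
-- def minMaxSum(arr):
--     # Single pass: min sum = total - max element, max sum = total - min element.
--     # (Unlike A, does not sort arr in place.)
--     if not arr:
--         return '0 0'
--     total = sum(arr)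
--     return str(total - max(arr)) + ' ' + str(total - min(arr))
-- ===== Notes on version B (the rewrite author's own statement) =====
-- stated objective: faster
-- what changed: Replaces sort + two index loops with a single pass: min partial sum = total - max element, max partial sum = total - min element (note: A sorts arr in place, B does not mutate it; return values agree).
import Mathlib
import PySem

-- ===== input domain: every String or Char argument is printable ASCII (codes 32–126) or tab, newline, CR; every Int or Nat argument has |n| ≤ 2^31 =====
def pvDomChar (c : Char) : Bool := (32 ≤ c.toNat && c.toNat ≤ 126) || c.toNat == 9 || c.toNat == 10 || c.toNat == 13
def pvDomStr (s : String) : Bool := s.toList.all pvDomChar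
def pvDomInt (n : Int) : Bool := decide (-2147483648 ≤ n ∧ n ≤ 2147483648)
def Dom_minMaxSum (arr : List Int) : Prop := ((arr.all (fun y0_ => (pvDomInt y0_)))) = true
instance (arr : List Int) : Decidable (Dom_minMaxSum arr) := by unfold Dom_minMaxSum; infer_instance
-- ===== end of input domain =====

-- B replaces A's sort + two index loops by a single pass (min sum = total - max, max sum = total - min);
-- equivalence is about the return value only: A sorts arr in place, B does not mutate it.


-- ===== PORT A =====
-- arr.sort(); max += arr[a] for a in range(len(arr)-1); min += arr[ar] for ar in range(len(arr)-1, 0, -1)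
def minMaxSum (arr : List Int) : String :=
  let s := PySem.List.sorted arr (fun x => x) false
  let mx := (PySem.List.pyRange 0 ((s.length : Int) - 1) 1).foldl
    (fun acc a => acc + PySem.List.pyGetD s a 0) 0
  let mn := (PySem.List.pyRange ((s.length : Int) - 1) 0 (-1)).foldl
    (fun acc ar => acc + PySem.List.pyGetD s ar 0) 0
  PySem.Int.toStr mx ++ " " ++ PySem.Int.toStr mn

-- ===== PORT B =====
def minMaxSum_alt (arr : List Int) : String :=
  match arr with
  | [] => "0 0"
  | x :: t =>
    let total := (x :: t).sum
    PySem.Int.toStr (total - t.foldl max x) ++ " " ++ PySem.Int.toStr (total - t.foldl min x)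

-- ===== PRECONDITION & SPEC =====
def Spec_minMaxSum (arr : List Int) (out : String) : Prop := out = minMaxSum_alt arr
instance (arr : List Int) (out : String) : Decidable (Spec_minMaxSum arr out) := by unfold Spec_minMaxSum; infer_instance

-- ===== CLAIM (what is proved, stated in full; the proofs are below) =====
def Claim_equal_minMaxSum : Prop := ∀ (arr : List Int), Dom_minMaxSum arr → Spec_minMaxSum arr (minMaxSum arr)

-- ===== LEMMAS AND PROOFS =====

-- indices 0..m-1 read back the prefix of s
lemma map_range_getD (s : List Int) (m : Nat) (hm : m ≤ s.length) :
    (List.range m).map (fun k => s.getD k 0) = s.take m := by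
  apply List.ext_getElem
  · simp [Nat.min_eq_left hm]
  · intro i h1 h2
    simp only [List.getElem_map, List.getElem_range, List.getElem_take]
    rw [List.getD_eq_getElem]

-- the first loop of A sums s[0..m-1]
lemma sum_range_pyGetD (s : List Int) (m : Nat) (hm : m ≤ s.length) :
    (PySem.List.pyRange 0 (m : Int) 1).foldl (fun acc a => acc + PySem.List.pyGetD s a 0) 0
      = (s.take m).sum := by
  rw [PySem.List.foldl_add, PySem.List.pyRange_zero_nat, List.map_map]
  simp only [Function.comp_def, PySem.List.pyGetD_natCast]
  rw [map_range_getD s m hm, zero_add]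

-- the second loop of A sums s[1..]
lemma a_second_loop (s : List Int) :
    (PySem.List.pyRange ((s.length : Int) - 1) 0 (-1)).foldl
      (fun acc ar => acc + PySem.List.pyGetD s ar 0) 0 = s.tail.sum := by
  rw [PySem.List.pyRange_neg_one_eq_reverse]
  have h1 : (0 : Int) + 1 = 1 := by ring
  have h2 : ((s.length : Int) - 1) + 1 = (s.length : Int) := by ring
  rw [h1, h2, PySem.List.foldl_add, List.map_reverse, List.sum_reverse,
      PySem.List.map_pyGetD_pyRange' s 0 (by norm_num : (0:Int) ≤ 1), zero_add]
  rw [show (1:Int).toNat = 1 from rfl, List.drop_one]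

-- in a (≤)-pairwise list every element is at most the last one
lemma pairwise_le_getLast (l : List Int) (h : l ≠ []) (hp : l.Pairwise (· ≤ ·)) :
    ∀ y ∈ l, y ≤ l.getLast h := by
  induction l with
  | nil => exact absurd rfl h
  | cons a t ih =>
    intro y hy
    cases t with
    | nil =>
      simp only [List.mem_singleton] at hy
      simp [hy, List.getLast]
    | cons b u =>
      rw [List.getLast_cons (by simp)]
      rcases List.mem_cons.mp hy with rfl | hy'
      · exact le_trans
          (List.rel_of_pairwise_cons hp (List.getLast_mem (by simp)))
          (le_refl _)
      · exact ih (by simp) hp.of_cons y hy'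

-- the last element of a sorted permutation of x :: t is the running max
lemma getLast_sorted_eq_foldl_max (x : Int) (t : List Int) (s : List Int)
    (hperm : s.Perm (x :: t)) (hpw : s.Pairwise (· ≤ ·)) (hs : s ≠ []) :
    s.getLast hs = t.foldl max x := by
  have hmax := PySem.List.max?_id_cons x t
  have hMmem : t.foldl max x ∈ x :: t := PySem.List.max?_mem hmax
  have hMmax : ∀ y ∈ x :: t, y ≤ t.foldl max x := PySem.List.max?_isMax hmax
  apply le_antisymm
  · exact hMmax _ (hperm.mem_iff.mp (List.getLast_mem hs))
  · exact pairwise_le_getLast s hs hpw _ (hperm.mem_iff.mpr hMmem)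

-- the head of a sorted permutation of x :: t is the running min
lemma head_sorted_eq_foldl_min (x : Int) (t : List Int) (s : List Int)
    (hperm : s.Perm (x :: t)) (hpw : s.Pairwise (· ≤ ·)) (hs : s ≠ []) :
    s.head hs = t.foldl min x := by
  have hmin := PySem.List.min?_id_cons x t
  have hMmem : t.foldl min x ∈ x :: t := PySem.List.min?_mem hmin
  have hMmin : ∀ y ∈ x :: t, t.foldl min x ≤ y := PySem.List.min?_isMin hmin
  apply le_antisymm
  · have hMs : t.foldl min x ∈ s := hperm.mem_iff.mpr hMmem
    cases s with
    | nil => exact absurd rfl hs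
    | cons a r =>
      rcases List.mem_cons.mp hMs with h | h
      · simp [h]
      · exact List.rel_of_pairwise_cons hpw h
  · exact hMmin _ (hperm.mem_iff.mp (List.head_mem hs))

-- ===== VERDICT (by name: the statement is the Claim_ definition above) =====
theorem minMaxSum_spec : Claim_equal_minMaxSum := by
  intro arr _
  unfold Spec_minMaxSum
  cases arr with
  | nil => rfl
  | cons x t =>
    set s := PySem.List.sorted (x :: t) (fun y => y) false with hsdef
    have hperm : s.Perm (x :: t) := PySem.List.sorted_perm _ _ _
    have hs : s ≠ [] := by
      intro h
      have hl := hperm.length_eq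
      rw [h] at hl
      simp at hl
    have hpw : s.Pairwise (· ≤ ·) := PySem.List.sorted_pairwise (x :: t) (fun y => y)
    have hlen : 1 ≤ s.length := by
      have hl := hperm.length_eq
      simp at hl
      omega
    have hm1 : ((s.length : Int) - 1) = ((s.length - 1 : Nat) : Int) := by push_cast [hlen]; ring
    have hsum : s.sum = (x :: t).sum := hperm.sum_eq
    have key1 : (PySem.List.pyRange 0 ((s.length : Int) - 1) 1).foldl
        (fun acc a => acc + PySem.List.pyGetD s a 0) 0 = (x :: t).sum - t.foldl max x := by
      rw [hm1, sum_range_pyGetD s (s.length - 1) (Nat.sub_le _ _), ← List.dropLast_eq_take]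
      have h1 : s.dropLast.sum + s.getLast hs = s.sum := by
        conv_rhs => rw [← List.dropLast_concat_getLast hs]
        rw [List.sum_append]
        simp
      rw [getLast_sorted_eq_foldl_max x t s hperm hpw hs, hsum] at h1
      omega
    have key2 : (PySem.List.pyRange ((s.length : Int) - 1) 0 (-1)).foldl
        (fun acc ar => acc + PySem.List.pyGetD s ar 0) 0 = (x :: t).sum - t.foldl min x := by
      rw [a_second_loop s]
      have h2 : s.head hs + s.tail.sum = s.sum := by
        rw [← List.sum_cons, List.cons_head_tail hs]
      rw [head_sorted_eq_foldl_min x t s hperm hpw hs, hsum] at h2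
      omega
    show minMaxSum (x :: t) = minMaxSum_alt (x :: t)
    simp only [minMaxSum, minMaxSum_alt, ← hsdef]
    rw [key1, key2]
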